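-- pv_equiv track=rewrite | github.com/SMJE4383-Group5/Group5--Assign1 | operatingtesting2.py | find_factors_and_check_perfect_number
-- ===== SOURCE A (Python) =====
-- def find_factors_and_check_perfect_number(number):
--     factors = []
--     for i in range(1, number):
--         if number % i == 0:
--             factors.append(i)
--
--     factor_sum = sum(factors)
--
--     if factor_sum == number:
--         result = "perfect"
--     else:
--         result = "not perfect"
--
--     return factors, factor_sum, result
-- ===== SOURCE B (Python) =====
-- def find_factors_and_check_perfect_number(number):
--     # trial division up to sqrt(number): collect each divisor pair (i, number//i)
--     small = []
--     large = []
--     i = 1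
--     while i * i <= number:
--         if number % i == 0:
--             if i != number:
--                 small.append(i)
--             j = number // i
--             if j != i and j != number:
--                 large.append(j)
--         i += 1
--     factors = small + large[::-1]
--     factor_sum = sum(factors)
--     if factor_sum == number:
--         result = "perfect"
--     else:
--         result = "not perfect"
--     return factors, factor_sum, result
-- ===== Notes on version B (the rewrite author's own statement) =====
-- stated objective: faster
-- what changed: B replaces A's scan of every i in range(1, number) with trial division up to sqrt(number), collecting each divisor pair (i, number//i) into a small/large list and concatenating small + reversed large, which is already in ascending order.
import Mathlib
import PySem

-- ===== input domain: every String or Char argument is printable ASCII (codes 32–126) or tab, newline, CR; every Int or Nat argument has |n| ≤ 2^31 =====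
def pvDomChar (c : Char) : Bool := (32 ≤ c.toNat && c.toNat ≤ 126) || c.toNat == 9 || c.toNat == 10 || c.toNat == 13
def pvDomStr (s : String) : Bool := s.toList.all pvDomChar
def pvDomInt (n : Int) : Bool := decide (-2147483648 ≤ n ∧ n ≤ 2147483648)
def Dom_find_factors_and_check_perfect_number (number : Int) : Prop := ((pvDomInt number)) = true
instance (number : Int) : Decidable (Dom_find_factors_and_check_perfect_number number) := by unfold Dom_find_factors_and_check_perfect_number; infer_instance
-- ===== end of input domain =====

-- B lists proper divisors by trial division up to sqrt(number) (divisor pairs, small + reversed large),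
-- instead of A's scan of every i in range(1, number): asymptotically faster, same exact result.


-- ===== PORT A =====
def find_factors_and_check_perfect_number (number : Int) : List Int × Int × String :=
  let factors := (PySem.List.pyRange 1 number).foldl
    (fun acc i => if PySem.Int.mod number i == 0 then acc ++ [i] else acc) []
  let factor_sum := factors.sum
  let result := if factor_sum == number then "perfect" else "not perfect"
  (factors, factor_sum, result)

-- ===== PORT B =====
-- the while-loop of Source B: i counts up while i*i ≤ number, appending to small/large.
-- fuel is only a structural totality guard: number.toNat iterations always suffice
-- (the loop body runs only while i*i ≤ number, hence at most number times from i = 1).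
def pvBLoop (number : Int) (fuel : Nat) (i : Int) (small large : List Int) : List Int × List Int :=
  match fuel with
  | 0 => (small, large)
  | fuel + 1 =>
    if i * i ≤ number then
      if PySem.Int.mod number i == 0 then
        pvBLoop number fuel (i + 1)
          (if i ≠ number then small ++ [i] else small)
          (if PySem.Int.floordiv number i ≠ i ∧ PySem.Int.floordiv number i ≠ number
           then large ++ [PySem.Int.floordiv number i] else large)
      else pvBLoop number fuel (i + 1) small large
    else (small, large)

def find_factors_and_check_perfect_number_alt (number : Int) : List Int × Int × String :=
  let p := pvBLoop number number.toNat 1 [] []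
  let factors := p.1 ++ p.2.reverse
  let factor_sum := factors.sum
  let result := if factor_sum == number then "perfect" else "not perfect"
  (factors, factor_sum, result)

-- ===== PRECONDITION & SPEC =====
def Spec_find_factors_and_check_perfect_number (number : Int) (out : List Int × Int × String) : Prop := out = find_factors_and_check_perfect_number_alt number
instance (number : Int) (out : List Int × Int × String) : Decidable (Spec_find_factors_and_check_perfect_number number out) := by unfold Spec_find_factors_and_check_perfect_number; infer_instance

-- ===== CLAIM (what is proved, stated in full; the proofs are below) =====
def Claim_equal_find_factors_and_check_perfect_number : Prop := ∀ (number : Int), Dom_find_factors_and_check_perfect_number number → Spec_find_factors_and_check_perfect_number number (find_factors_and_check_perfect_number number)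

-- ===== LEMMAS AND PROOFS =====

theorem pv_le_mul_self (a : Int) : a ≤ a * a := by
  by_cases h : a ≤ 0
  · exact le_trans h (mul_self_nonneg a)
  · exact le_mul_of_one_le_right (by omega) (by omega)

-- the small-divisor track of pvBLoop, accumulator-free
def pvSmalls (number : Int) (fuel : Nat) (i : Int) : List Int :=
  match fuel with
  | 0 => []
  | fuel + 1 =>
    if i * i ≤ number then
      if PySem.Int.mod number i == 0 then
        (if i ≠ number then [i] else []) ++ pvSmalls number fuel (i + 1)
      else pvSmalls number fuel (i + 1)
    else []

-- the large-cofactor track of pvBLoop, accumulator-free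
def pvLarges (number : Int) (fuel : Nat) (i : Int) : List Int :=
  match fuel with
  | 0 => []
  | fuel + 1 =>
    if i * i ≤ number then
      if PySem.Int.mod number i == 0 then
        (if PySem.Int.floordiv number i ≠ i ∧ PySem.Int.floordiv number i ≠ number
         then [PySem.Int.floordiv number i] else []) ++ pvLarges number fuel (i + 1)
      else pvLarges number fuel (i + 1)
    else []

theorem pvBLoop_spec : ∀ (k : Nat) (number i : Int),
    ∀ small large, pvBLoop number k i small large =
      (small ++ pvSmalls number k i, large ++ pvLarges number k i) := by
  intro k
  induction k with
  | zero => intro number i small large; simp [pvBLoop, pvSmalls, pvLarges]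
  | succ k ih =>
    intro number i small large
    by_cases hg : i * i ≤ number
    · by_cases hm : (PySem.Int.mod number i == 0) = true
      · simp only [pvBLoop, pvSmalls, pvLarges, if_pos hg, if_pos hm, ih]
        split_ifs <;> simp
      · simp only [pvBLoop, pvSmalls, pvLarges, if_pos hg, if_neg hm, ih]
    · simp [pvBLoop, pvSmalls, pvLarges, if_neg hg]

theorem pv_floordiv_of_dvd (n d c : Int) (hd : 0 < d) (h : c * d = n) :
    PySem.Int.floordiv n d = c :=
  (PySem.Int.floordiv_eq_iff_of_pos hd).mpr ⟨le_of_eq h, by nlinarith⟩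

theorem pvSmalls_mem : ∀ (k : Nat) (number i : Int), (number + 1 - i).toNat ≤ k → 1 ≤ i →
    ∀ x, x ∈ pvSmalls number k i ↔
      (i ≤ x ∧ x * x ≤ number ∧ x ∣ number ∧ x ≠ number) := by
  intro k
  induction k with
  | zero =>
    intro number i hk hi x
    simp only [pvSmalls, List.not_mem_nil, false_iff]
    rintro ⟨h1, h2, -, -⟩
    have := pv_le_mul_self x
    omega
  | succ k ih =>
    intro number i hk hi x
    by_cases hg : i * i ≤ number
    · have hk' : (number + 1 - (i + 1)).toNat ≤ k := by
        have := pv_le_mul_self i; omega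
      have ih' := ih number (i + 1) hk' (by omega) x
      by_cases hm : i ∣ number
      · have hm' : (PySem.Int.mod number i == 0) = true := by
          simp [PySem.Int.mod_eq_zero_iff_dvd, hm]
        rw [pvSmalls, if_pos hg, if_pos hm']
        simp only [List.mem_append, ih']
        constructor
        · rintro (h | ⟨h1, h2, h3, h4⟩)
          · split_ifs at h with hne
            · simp at h; subst h; exact ⟨le_refl _, hg, hm, hne⟩
            · simp at h
          · exact ⟨by omega, h2, h3, h4⟩
        · rintro ⟨h1, h2, h3, h4⟩
          by_cases hxi : x = i
          · subst hxi
            left; rw [if_pos h4]; simp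
          · right; exact ⟨by omega, h2, h3, h4⟩
      · have hm' : ¬ (PySem.Int.mod number i == 0) = true := by
          simp [PySem.Int.mod_eq_zero_iff_dvd, hm]
        rw [pvSmalls, if_pos hg, if_neg hm']
        rw [ih']
        constructor
        · rintro ⟨h1, h2, h3, h4⟩; exact ⟨by omega, h2, h3, h4⟩
        · rintro ⟨h1, h2, h3, h4⟩
          have hxi : x ≠ i := by rintro rfl; exact hm h3
          exact ⟨by omega, h2, h3, h4⟩
    · rw [pvSmalls, if_neg hg]
      simp only [List.not_mem_nil, false_iff]
      rintro ⟨h1, h2, -, -⟩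
      have hxx : i * i ≤ x * x := by
        apply mul_le_mul h1 h1 (by omega) (by omega)
      omega

theorem pvLarges_mem : ∀ (k : Nat) (number i : Int), (number + 1 - i).toNat ≤ k →
    1 ≤ i → 1 ≤ number →
    ∀ x, x ∈ pvLarges number k i ↔
      (∃ d, i ≤ d ∧ d * d ≤ number ∧ d ∣ number ∧ x * d = number ∧ x ≠ d ∧ x ≠ number) := by
  intro k
  induction k with
  | zero =>
    intro number i hk hi hn x
    simp only [pvLarges, List.not_mem_nil, false_iff]
    rintro ⟨d, h1, h2, -, -, -⟩
    have := pv_le_mul_self d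
    omega
  | succ k ih =>
    intro number i hk hi hn x
    by_cases hg : i * i ≤ number
    · have hk' : (number + 1 - (i + 1)).toNat ≤ k := by
        have := pv_le_mul_self i; omega
      have ih' := ih number (i + 1) hk' (by omega) hn x
      by_cases hm : i ∣ number
      · obtain ⟨c, hc⟩ := hm
        have hci : c * i = number := by rw [hc]; ring
        have hj : PySem.Int.floordiv number i = c :=
          pv_floordiv_of_dvd number i c (by omega) hci
        have hm' : (PySem.Int.mod number i == 0) = true := by
          simp [PySem.Int.mod_eq_zero_iff_dvd]; exact ⟨c, hc⟩
        rw [pvLarges, if_pos hg, if_pos hm', hj]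
        simp only [List.mem_append, ih']
        constructor
        · rintro (h | ⟨d, h1, h2, h3, h4, h5, h6⟩)
          · split_ifs at h with hne
            · simp at h; rw [h]
              exact ⟨i, le_refl i, hg, ⟨c, hc⟩, hci, hne.1, hne.2⟩
            · simp at h
          · exact ⟨d, by omega, h2, h3, h4, h5, h6⟩
        · rintro ⟨d, h1, h2, h3, h4, h5, h6⟩
          by_cases hdi : d = i
          · subst hdi
            have hxc : x = c := by
              have : x * d = c * d := by rw [h4, hci]
              exact mul_right_cancel₀ (by omega) this
            subst hxc
            left; rw [if_pos ⟨h5, h6⟩]; simp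
          · right; exact ⟨d, by omega, h2, h3, h4, h5, h6⟩
      · have hm' : ¬ (PySem.Int.mod number i == 0) = true := by
          simp [PySem.Int.mod_eq_zero_iff_dvd, hm]
        rw [pvLarges, if_pos hg, if_neg hm']
        rw [ih']
        constructor
        · rintro ⟨d, h1, h2, h3, h4, h5, h6⟩; exact ⟨d, by omega, h2, h3, h4, h5, h6⟩
        · rintro ⟨d, h1, h2, h3, h4, h5, h6⟩
          have hdi : d ≠ i := by rintro rfl; exact hm h3
          exact ⟨d, by omega, h2, h3, h4, h5, h6⟩
    · rw [pvLarges, if_neg hg]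
      simp only [List.not_mem_nil, false_iff]
      rintro ⟨d, h1, h2, -, -, -⟩
      have hxx : i * i ≤ d * d := by
        apply mul_le_mul h1 h1 (by omega) (by omega)
      omega

theorem pvSmalls_pairwise : ∀ (k : Nat) (number i : Int), (number + 1 - i).toNat ≤ k →
    1 ≤ i → List.Pairwise (· < ·) (pvSmalls number k i) := by
  intro k
  induction k with
  | zero => intro number i hk hi; simp [pvSmalls]
  | succ k ih =>
    intro number i hk hi
    by_cases hg : i * i ≤ number
    · have hk' : (number + 1 - (i + 1)).toNat ≤ k := by
        have := pv_le_mul_self i; omega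
      have htail := ih number (i + 1) hk' (by omega)
      have hmem : ∀ y ∈ pvSmalls number k (i + 1), i < y := by
        intro y hy
        have := (pvSmalls_mem k number (i + 1) hk' (by omega) y).mp hy
        omega
      by_cases hm : (PySem.Int.mod number i == 0) = true
      · rw [pvSmalls, if_pos hg, if_pos hm]
        split_ifs with hne
        · exact List.pairwise_append.mpr ⟨by simp, htail, by simpa using hmem⟩
        · simpa using htail
      · rw [pvSmalls, if_pos hg, if_neg hm]; exact htail
    · rw [pvSmalls, if_neg hg]; exact List.Pairwise.nil

theorem pv_cofactor_lt (n x a y b : Int) (hx : x * a = n) (hy : y * b = n)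
    (ha : 1 ≤ a) (hab : a < b) (hn : 1 ≤ n) : y < x := by
  have hx1 : 1 ≤ x := by nlinarith
  have hy1 : 1 ≤ y := by nlinarith
  by_contra h
  have h' : x ≤ y := by omega
  nlinarith

theorem pvLarges_pairwise : ∀ (k : Nat) (number i : Int), (number + 1 - i).toNat ≤ k →
    1 ≤ i → 1 ≤ number → List.Pairwise (· > ·) (pvLarges number k i) := by
  intro k
  induction k with
  | zero => intro number i hk hi hn; simp [pvLarges]
  | succ k ih =>
    intro number i hk hi hn
    by_cases hg : i * i ≤ number
    · have hk' : (number + 1 - (i + 1)).toNat ≤ k := by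
        have := pv_le_mul_self i; omega
      have htail := ih number (i + 1) hk' (by omega) hn
      by_cases hm : i ∣ number
      · obtain ⟨c, hc⟩ := hm
        have hci : c * i = number := by rw [hc]; ring
        have hj : PySem.Int.floordiv number i = c :=
          pv_floordiv_of_dvd number i c (by omega) hci
        have hm' : (PySem.Int.mod number i == 0) = true := by
          simp [PySem.Int.mod_eq_zero_iff_dvd]; exact ⟨c, hc⟩
        rw [pvLarges, if_pos hg, if_pos hm', hj]
        have hmem : ∀ y ∈ pvLarges number k (i + 1), y < c := by
          intro y hy
          obtain ⟨d, h1, h2, h3, h4, h5, h6⟩ :=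
            (pvLarges_mem k number (i + 1) hk' (by omega) hn y).mp hy
          exact pv_cofactor_lt number c i y d hci h4 hi (by omega) hn
        split_ifs with hne
        · exact List.pairwise_append.mpr ⟨by simp, htail, by simpa using hmem⟩
        · simpa using htail
      · have hm' : ¬ (PySem.Int.mod number i == 0) = true := by
          simp [PySem.Int.mod_eq_zero_iff_dvd, hm]
        rw [pvLarges, if_pos hg, if_neg hm']; exact htail
    · rw [pvLarges, if_neg hg]; exact List.Pairwise.nil

-- a small divisor is smaller than any stored large cofactor
theorem pv_cross_lt (n a b d : Int) (hn : 2 ≤ n) (ha1 : 1 ≤ a) (haa : a * a ≤ n)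
    (hd1 : 1 ≤ d) (hdd : d * d ≤ n) (hbd : b * d = n) (hbne : b ≠ d) : a < b := by
  have hb_ge : d ≤ b := by nlinarith
  have hb : d < b := lt_of_le_of_ne hb_ge (Ne.symm hbne)
  nlinarith

-- two strictly increasing integer lists with the same members are equal
theorem pv_chain_eq (l1 l2 : List Int) (h1 : l1.Pairwise (· < ·)) (h2 : l2.Pairwise (· < ·))
    (hm : ∀ x, x ∈ l1 ↔ x ∈ l2) : l1 = l2 := by
  have n1 : l1.Nodup := h1.imp (fun h => ne_of_lt h)
  have n2 : l2.Nodup := h2.imp (fun h => ne_of_lt h)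
  have hp : l1.Perm l2 := (List.perm_ext_iff_of_nodup n1 n2).mpr hm
  exact hp.eq_of_pairwise (fun a b _ _ h h' => le_antisymm h h')
    (h1.imp le_of_lt) (h2.imp le_of_lt)

-- the pairing theorem: A's full scan equals B's small ++ reversed large, for number ≥ 2
theorem pv_factors_eq (number : Int) (h2 : 2 ≤ number) :
    (PySem.List.pyRange 1 number).filter (fun i => PySem.Int.mod number i == 0)
      = pvSmalls number number.toNat 1 ++ (pvLarges number number.toNat 1).reverse := by
  set k := (number : Int).toNat with hkdef
  have hk : (number + 1 - 1).toNat ≤ k := by omega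
  apply pv_chain_eq
  · exact (PySem.List.pairwise_lt_pyRange_one 1 number).filter _
  · apply List.pairwise_append.mpr
    refine ⟨pvSmalls_pairwise k number 1 hk (by omega), ?_, ?_⟩
    · rw [List.pairwise_reverse]
      exact pvLarges_pairwise k number 1 hk (by omega) (by omega)
    · intro a ha b hb
      rw [List.mem_reverse] at hb
      obtain ⟨ha1, haa, -, -⟩ := (pvSmalls_mem k number 1 hk (by omega) a).mp ha
      obtain ⟨d, hd1, hdd, -, hbd, hbne, -⟩ :=
        (pvLarges_mem k number 1 hk (by omega) (by omega) b).mp hb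
      exact pv_cross_lt number a b d h2 ha1 haa hd1 hdd hbd hbne
  · intro x
    rw [List.mem_filter, PySem.List.mem_pyRange_one, List.mem_append, List.mem_reverse,
        pvSmalls_mem k number 1 hk (by omega), pvLarges_mem k number 1 hk (by omega) (by omega)]
    simp only [beq_iff_eq, PySem.Int.mod_eq_zero_iff_dvd]
    constructor
    · rintro ⟨⟨hx1, hxn⟩, hdvd⟩
      by_cases hxx : x * x ≤ number
      · exact Or.inl ⟨hx1, hxx, hdvd, by omega⟩
      · obtain ⟨c, hc⟩ := hdvd
        have hc1 : 1 ≤ c := by nlinarith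
        have hcx : c < x := by nlinarith
        refine Or.inr ⟨c, hc1, by nlinarith, ⟨x, by rw [hc]; ring⟩, hc.symm,
          by omega, by omega⟩
    · rintro (⟨hx1, hxx, hdvd, hxn⟩ | ⟨d, hd1, hdd, hddvd, hxd, hxne, hxn⟩)
      · have hxle : x ≤ number := Int.le_of_dvd (by omega) hdvd
        exact ⟨⟨hx1, by omega⟩, hdvd⟩
      · have hx1 : 1 ≤ x := by nlinarith
        have hxdvd : x ∣ number := ⟨d, by rw [← hxd]⟩
        have hxle : x ≤ number := Int.le_of_dvd (by omega) hxdvd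
        exact ⟨⟨hx1, by omega⟩, hxdvd⟩

-- ===== VERDICT (by name: the statement is the Claim_ definition above) =====
theorem find_factors_and_check_perfect_number_spec : Claim_equal_find_factors_and_check_perfect_number := by
  intro number _
  unfold Spec_find_factors_and_check_perfect_number
  unfold find_factors_and_check_perfect_number find_factors_and_check_perfect_number_alt
  rw [PySem.List.foldl_append_if_eq_filter, pvBLoop_spec number.toNat number 1]
  simp only [List.nil_append]
  by_cases h1 : number ≤ 1
  · -- number ≤ 1: both lists are empty
    have hA : PySem.List.pyRange 1 number = [] := PySem.List.pyRange_one_eq_nil (by omega)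
    by_cases h0 : number ≤ 0
    · have hk0 : number.toNat = 0 := by omega
      rw [hA, hk0]
      simp [pvSmalls, pvLarges]
    · have hn1 : number = 1 := by omega
      subst hn1
      have hS : pvSmalls 1 1 1 = [] := by
        rw [pvSmalls, pvSmalls]; norm_num
      have hL : pvLarges 1 1 1 = [] := by
        rw [pvLarges, pvLarges]
        norm_num [pv_floordiv_of_dvd 1 1 1 (by omega) (by ring)]
      rw [hA]
      simp [hS, hL]
  · rw [pv_factors_eq number (by omega)]
    rfl
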